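-- pv_equiv track=rewrite | github.com/jiiiiiw/CodingTest | 프로그래머스/1/160586. 대충 만든 자판/대충 만든 자판.py | solution
-- ===== SOURCE A (Python) =====
-- def solution(keymap, targets):
--     t = ""
--     for i in targets :
--         t += i
--     t = list(set(t))
--
--     d = dict()
--     for i in t :
--         temp = [j.index(i) for j in keymap if i in j]
--         if len(temp) == 0 :
--             d[i] = -1
--         else :
--             d[i] = min(temp) + 1
--
--     result = list()
--     for j in targets :
--         temp = [d[i] for i in j]
--         if -1 in temp :
--             result.append(-1)
--         else :
--             result.append(sum(temp))
--
--     return result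
-- ===== SOURCE B (Python) =====
-- def solution(keymap, targets):
--     cost = {}
--     for s in keymap:
--         for idx, ch in enumerate(s):
--             v = idx + 1
--             if ch not in cost or v < cost[ch]:
--                 cost[ch] = v
--     result = []
--     for t in targets:
--         total = 0
--         for ch in t:
--             v = cost.get(ch, -1)
--             if v == -1:
--                 total = -1
--                 break
--             total += v
--         result.append(total)
--     return result
-- ===== Notes on version B (the rewrite author's own statement) =====
-- stated objective: faster
-- what changed: B replaces A's per-distinct-character scan of all keymap strings (building a temp list with .index and min per character) by one inverted pass over keymap positions via enumerate that keeps the minimum idx+1 per character, and sums each target directly with cost.get(c,-1) and an early break.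
import Mathlib
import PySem

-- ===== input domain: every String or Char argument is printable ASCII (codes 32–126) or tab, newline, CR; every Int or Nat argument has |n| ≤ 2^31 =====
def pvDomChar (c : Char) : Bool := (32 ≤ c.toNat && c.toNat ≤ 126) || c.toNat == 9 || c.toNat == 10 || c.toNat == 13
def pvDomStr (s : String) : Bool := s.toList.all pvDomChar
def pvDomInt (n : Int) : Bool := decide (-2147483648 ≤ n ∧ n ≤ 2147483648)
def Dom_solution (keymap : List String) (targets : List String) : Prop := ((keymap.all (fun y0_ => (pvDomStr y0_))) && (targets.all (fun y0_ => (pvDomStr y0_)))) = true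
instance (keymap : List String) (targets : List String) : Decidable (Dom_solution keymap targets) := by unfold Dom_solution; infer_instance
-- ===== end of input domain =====

-- B builds the per-character cost table in one inverted pass over keymap positions instead of
-- scanning every keymap string once per distinct target character (objective: faster).

-- ===== PORT A =====
-- 'i in j' / 'j.index(i)' for the one-character string i are char membership / first char index
-- (index? none = ValueError, unreachable under the 'i in j' guard, so getD 0 never supplies its default).
def solution (keymap : List String) (targets : List String) : List Int :=
  let t : List Char := targets.foldl (fun acc i => acc ++ i.toList) []
  let tset : PySem.Set Char := PySem.Set.ofList t
  let d : PySem.Dict Char Int := tset.foldl (fun d i =>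
      let temp : List Int := (keymap.filter (fun j => j.toList.contains i)).map
          (fun j => (((PySem.List.index? j.toList i).getD 0 : Nat) : Int))
      if temp.length = 0 then d.insert i (-1)
      else d.insert i ((PySem.List.min? temp (fun x => x)).getD 0 + 1)) PySem.Dict.empty
  -- d is only looked up below, so the set's iteration order cannot affect the result
  targets.map (fun j =>
      let temp : List Int := j.toList.map (fun i => d.getD i 0)  -- d[i]; every char of targets is a key of d
      if temp.contains (-1) then (-1 : Int) else temp.sum)

-- ===== PORT B =====
-- the 'for ch in t' loop with break, from Source B
def sumCostB (cost : PySem.Dict Char Int) : List Char → Int → Int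
  | [], acc => acc
  | ch :: rest, acc =>
    let v := cost.getD ch (-1)
    if v = -1 then -1 else sumCostB cost rest (acc + v)

def solution_alt (keymap : List String) (targets : List String) : List Int :=
  let cost : PySem.Dict Char Int := keymap.foldl (fun c s =>
      (PySem.List.enumerate s.toList 0).foldl (fun c p =>
        if (!c.contains p.2) || p.1 + 1 < c.getD p.2 0 then c.insert p.2 (p.1 + 1) else c) c)
    PySem.Dict.empty
  targets.map (fun t => sumCostB cost t.toList 0)

-- ===== PRECONDITION & SPEC =====
def Spec_solution (keymap : List String) (targets : List String) (out : List Int) : Prop := out = solution_alt keymap targets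
instance (keymap : List String) (targets : List String) (out : List Int) : Decidable (Spec_solution keymap targets out) := by unfold Spec_solution; infer_instance

-- ===== CLAIM (what is proved, stated in full; the proofs are below) =====
def Claim_equal_solution : Prop := ∀ (keymap : List String) (targets : List String), Dom_solution keymap targets → Spec_solution keymap targets (solution keymap targets)

-- ===== LEMMAS AND PROOFS =====

-- first occurrence of ch in s, as its press cost idx+1 (none = ch absent from s)
def firstHit (s : List Char) (ch : Char) : Option Int :=
  (PySem.List.index? s ch).map (fun n => (n : Int) + 1)

def optMin : Option Int → Option Int → Option Int
  | none, o => o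
  | some a, none => some a
  | some a, some b => some (min a b)

-- the cost both programs assign to ch, as an Option (none = ch in no keymap string)
def costOf (keymap : List String) (ch : Char) : Option Int :=
  keymap.foldl (fun acc s => optMin acc (firstHit s.toList ch)) none

-- A's comprehension [j.index(i) for j in keymap if i in j] and its dict value
def tempA (keymap : List String) (i : Char) : List Int :=
  (keymap.filter (fun j => j.toList.contains i)).map
    (fun j => (((PySem.List.index? j.toList i).getD 0 : Nat) : Int))

def fA (keymap : List String) (i : Char) : Int :=
  if (tempA keymap i).length = 0 then -1
  else (PySem.List.min? (tempA keymap i) (fun x => x)).getD 0 + 1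

theorem optMin_none_right (o : Option Int) : optMin o none = o := by cases o <;> rfl

theorem optMin_assoc (a b c : Option Int) : optMin (optMin a b) c = optMin a (optMin b c) := by
  cases a <;> cases b <;> cases c <;> simp [optMin, min_assoc]

theorem foldl_optMin (f : String → Option Int) (l : List String) (acc : Option Int) :
    l.foldl (fun a s => optMin a (f s)) acc = optMin acc (l.foldl (fun a s => optMin a (f s)) none) := by
  induction l generalizing acc with
  | nil => simp [optMin_none_right]
  | cons s rest ih =>
    simp only [List.foldl_cons]
    rw [ih, ih (acc := optMin none (f s))]
    show optMin (optMin acc (f s)) _ = optMin acc (optMin (optMin none (f s)) _)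
    rw [optMin_assoc]
    rfl

theorem costOf_cons (s : String) (rest : List String) (ch : Char) :
    costOf (s :: rest) ch = optMin (firstHit s.toList ch) (costOf rest ch) := by
  simp only [costOf, List.foldl_cons]
  rw [foldl_optMin]
  cases firstHit s.toList ch <;> simp [optMin]

-- one update step of B's table keeps the minimum cost seen for that character
theorem step_get?_self (c : PySem.Dict Char Int) (a : Char) (v : Int) :
    (if (!c.contains a) || v < c.getD a 0 then c.insert a v else c).get? a
      = optMin (c.get? a) (some v) := by
  by_cases hc : c.contains a = true
  · obtain ⟨w, hw⟩ : ∃ w, c.get? a = some w := by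
      have := PySem.Dict.contains_eq_isSome_get? (d := c) (k := a)
      rw [hc] at this
      exact Option.isSome_iff_exists.mp this.symm
    rw [PySem.Dict.getD_of_get?_eq_some c 0 hw, hw]
    by_cases hlt : v < w
    · simp [hc, hlt, PySem.Dict.get?_insert_self, optMin]
      omega
    · simp [hc, hlt, optMin]
      rw [hw]
      simp only [Option.some.injEq]
      omega
  · have hnone : c.get? a = none := by
      rw [PySem.Dict.get?_eq_none_iff_contains]
      simpa using hc
    simp [hc, PySem.Dict.get?_insert_self, hnone, optMin]

theorem step_get?_ne (c : PySem.Dict Char Int) (a ch : Char) (v : Int) (h : a ≠ ch) :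
    (if (!c.contains a) || v < c.getD a 0 then c.insert a v else c).get? ch = c.get? ch := by
  split_ifs
  · exact PySem.Dict.get?_insert_of_ne _ _ (Ne.symm h)
  · rfl

-- B's inner loop over enumerate(s): the table entry becomes the min of its old value and k + first index + 1
theorem get?_innerFold (ch : Char) : ∀ (cs : List Char) (k : Int) (c : PySem.Dict Char Int),
    ((PySem.List.enumerate cs k).foldl (fun c p =>
        if (!c.contains p.2) || p.1 + 1 < c.getD p.2 0 then c.insert p.2 (p.1 + 1) else c) c).get? ch
      = optMin (c.get? ch) ((PySem.List.index? cs ch).map (fun n => k + n + 1)) := by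
  intro cs
  induction cs with
  | nil => intro k c; simp [PySem.List.enumerate_nil, PySem.List.index?_eq_idxOf?, optMin_none_right]
  | cons a rest ih =>
    intro k c
    rw [PySem.List.enumerate_cons, List.foldl_cons, ih]
    by_cases hch : a = ch
    · subst hch
      rw [PySem.List.index?_cons_self, step_get?_self]
      rcases hrest : PySem.List.index? rest a with _ | n <;>
        rcases hc : c.get? a with _ | w <;>
          simp [hrest, hc, optMin] <;> omega
    · rw [step_get?_ne c a ch _ hch, PySem.List.index?_cons_of_ne rest hch]
      rcases hrest : PySem.List.index? rest ch with _ | n <;>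
        rcases hc : c.get? ch with _ | w <;>
          simp [hrest, hc, optMin] <;> omega

-- B's whole table-building pass computes costOf
theorem get?_cost (ch : Char) : ∀ (keymap : List String) (c : PySem.Dict Char Int),
    (keymap.foldl (fun c s =>
        (PySem.List.enumerate s.toList 0).foldl (fun c p =>
          if (!c.contains p.2) || p.1 + 1 < c.getD p.2 0 then c.insert p.2 (p.1 + 1) else c) c) c).get? ch
      = optMin (c.get? ch) (costOf keymap ch) := by
  intro keymap
  induction keymap with
  | nil => intro c; simp [costOf, optMin_none_right]
  | cons s rest ih =>
    intro c
    rw [List.foldl_cons, ih, get?_innerFold, costOf_cons, optMin_assoc]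
    have : ((PySem.List.index? s.toList ch).map (fun n => 0 + (n : Int) + 1)) = firstHit s.toList ch := by
      cases h : List.idxOf? ch s.toList <;> simp [firstHit, PySem.List.index?_eq_idxOf?, h]
    rw [this]

theorem optMin_some_min? (a : Int) (l : List Int) :
    optMin (some (a + 1)) ((PySem.List.min? l (fun x => x)).map (· + 1))
      = (PySem.List.min? (a :: l) (fun x => x)).map (· + 1) := by
  cases l with
  | nil => rfl
  | cons y t =>
    rw [PySem.List.min?_id_cons, PySem.List.min?_id_cons]
    show optMin (some (a + 1)) (some (t.foldl min y + 1)) = some ((y :: t).foldl min a + 1)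
    rw [List.foldl_cons, List.foldl_assoc]
    have : min (a + 1) (List.foldl min y t + 1) = min a (List.foldl min y t) + 1 := by omega
    simp [optMin, this]

-- costOf agrees with A's "min of first indices over keymap strings containing ch, plus one"
theorem costOf_eq_min_tempA (keymap : List String) (ch : Char) :
    costOf keymap ch = (PySem.List.min? (tempA keymap ch) (fun x => x)).map (· + 1) := by
  induction keymap with
  | nil => rfl
  | cons s rest ih =>
    rw [costOf_cons, ih]
    by_cases hmem : ch ∈ s.toList
    · obtain ⟨n, hn⟩ : ∃ n, PySem.List.index? s.toList ch = some n :=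
        Option.isSome_iff_exists.mp ((PySem.List.index?_isSome_iff _ _).mpr hmem)
      have hfilter : tempA (s :: rest) ch = ((n : Nat) : Int) :: tempA rest ch := by
        rw [PySem.List.index?_eq_idxOf?] at hn
        simp [tempA, hmem, hn]
      rw [hfilter, firstHit, hn, ← optMin_some_min?]
      rfl
    · have hidx : PySem.List.index? s.toList ch = none := (PySem.List.index?_eq_none_iff _ _).mpr hmem
      have hfilter : tempA (s :: rest) ch = tempA rest ch := by
        simp [tempA, hmem]
      rw [hfilter, firstHit, hidx]
      rfl

-- case analysis: either ch is in no keymap string (A stores -1, B's table misses),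
-- or both sides agree on a cost m ≥ 1
theorem costOf_cases (keymap : List String) (ch : Char) :
    (costOf keymap ch = none ∧ fA keymap ch = -1) ∨
    (∃ m, costOf keymap ch = some m ∧ fA keymap ch = m ∧ 1 ≤ m) := by
  rw [costOf_eq_min_tempA]
  rcases hmin : PySem.List.min? (tempA keymap ch) (fun x => x) with _ | m
  · left
    have : tempA keymap ch = [] := (PySem.List.min?_eq_none_iff _ _).mp hmin
    simp [fA, this]
  · right
    refine ⟨m + 1, rfl, ?_, ?_⟩
    · have hmem := PySem.List.min?_mem hmin
      have hne : (tempA keymap ch).length ≠ 0 := by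
        intro h0
        rw [List.length_eq_zero_iff] at h0
        simp [h0] at hmem
      simp [fA, hne, hmin]
    · have hmem := PySem.List.min?_mem hmin
      simp only [tempA, List.mem_map] at hmem
      obtain ⟨j, _, hj⟩ := hmem
      omega

theorem sumCostB_nil (cost : PySem.Dict Char Int) (acc : Int) : sumCostB cost [] acc = acc := rfl
theorem sumCostB_cons (cost : PySem.Dict Char Int) (ch : Char) (rest : List Char) (acc : Int) :
    sumCostB cost (ch :: rest) acc =
      if cost.getD ch (-1) = -1 then -1 else sumCostB cost rest (acc + cost.getD ch (-1)) := rfl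

-- B's per-target loop equals A's "−1 if any char costs −1, else the sum" over the same char costs
theorem sumCostB_eq (keymap : List String) (cost : PySem.Dict Char Int)
    (hc : ∀ ch, cost.get? ch = costOf keymap ch) :
    ∀ (cs : List Char) (acc : Int),
      sumCostB cost cs acc =
        if (cs.map (fA keymap)).contains (-1) then -1 else acc + (cs.map (fA keymap)).sum := by
  intro cs
  induction cs with
  | nil => intro acc; simp [sumCostB_nil]
  | cons ch rest ih =>
    intro acc
    rw [sumCostB_cons, PySem.Dict.getD_eq_get?_getD, hc ch]
    rcases costOf_cases keymap ch with ⟨hnone, hfa⟩ | ⟨m, hsome, hfa, hm⟩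
    · simp [hnone, hfa]
    · rw [hsome]
      have hne : (m : Int) ≠ -1 := by omega
      simp only [Option.getD_some, hne, if_false, ih, List.map_cons, hfa]
      have : List.contains ((m : Int) :: rest.map (fA keymap)) (-1)
           = List.contains (rest.map (fA keymap)) (-1) := by
        simp [hne.symm]
      rw [this]
      split_ifs with h
      · rfl
      · rw [List.sum_cons]; ring

-- A's dict-building loop: the body is an insert of fA, so lookups of seen keys give fA
theorem bodyA_eq (keymap : List String) :
    (fun (d : PySem.Dict Char Int) (i : Char) =>
      if ((keymap.filter (fun j => j.toList.contains i)).map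
          (fun j => (((PySem.List.index? j.toList i).getD 0 : Nat) : Int))).length = 0
      then d.insert i (-1)
      else d.insert i ((PySem.List.min? ((keymap.filter (fun j => j.toList.contains i)).map
          (fun j => (((PySem.List.index? j.toList i).getD 0 : Nat) : Int))) (fun x => x)).getD 0 + 1))
    = fun d i => d.insert i (fA keymap i) := by
  funext d i
  change (if (tempA keymap i).length = 0 then d.insert i (-1)
      else d.insert i ((PySem.List.min? (tempA keymap i) (fun x => x)).getD 0 + 1))
    = d.insert i (fA keymap i)
  unfold fA
  split_ifs <;> rfl

theorem get?_foldl_insert_fn (f : Char → Int) (ch : Char) :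
    ∀ (l : List Char) (d : PySem.Dict Char Int),
      (l.foldl (fun d a => d.insert a (f a)) d).get? ch
        = if ch ∈ l then some (f ch) else d.get? ch := by
  intro l
  induction l with
  | nil => intro d; simp
  | cons a rest ih =>
    intro d
    rw [List.foldl_cons, ih]
    by_cases hmem : ch ∈ rest
    · simp [hmem]
    · by_cases hch : ch = a
      · subst hch; simp [hmem, PySem.Dict.get?_insert_self]
      · simp [hmem, hch, PySem.Dict.get?_insert_of_ne _ _ hch]

-- ===== VERDICT (by name: the statement is the Claim_ definition above) =====
theorem solution_spec : Claim_equal_solution := by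
  unfold Claim_equal_solution
  intro keymap targets _
  unfold Spec_solution solution solution_alt
  simp only []
  apply List.map_eq_map_iff.mpr
  intro j hj
  -- the chars of all targets, and membership of j's chars in them
  have hmemt : ∀ ch ∈ j.toList,
      ch ∈ PySem.Set.ofList (targets.foldl (fun acc i => acc ++ i.toList) []) := by
    intro ch hch
    rw [PySem.Set.mem_ofList, PySem.List.foldl_append_eq_flatMap, List.nil_append]
    exact List.mem_flatMap.mpr ⟨j, hj, hch⟩
  -- A's dict lookup on chars of targets is fA
  have hd : ∀ ch ∈ j.toList,
      ((PySem.Set.ofList (targets.foldl (fun acc i => acc ++ i.toList) [])).foldl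
        (fun d i => d.insert i (fA keymap i)) PySem.Dict.empty).getD ch 0 = fA keymap ch := by
    intro ch hch
    rw [PySem.Dict.getD_eq_get?_getD, get?_foldl_insert_fn, if_pos (hmemt ch hch)]
    rfl
  rw [bodyA_eq]
  -- B's table lookup is costOf
  have hcost : ∀ ch,
      (keymap.foldl (fun c s =>
        (PySem.List.enumerate s.toList 0).foldl (fun c p =>
          if (!c.contains p.2) || p.1 + 1 < c.getD p.2 0 then c.insert p.2 (p.1 + 1) else c) c)
        PySem.Dict.empty).get? ch = costOf keymap ch := by
    intro ch
    rw [get?_cost]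
    rfl
  rw [sumCostB_eq keymap _ hcost]
  have hmap : j.toList.map (fun i =>
      ((PySem.Set.ofList (targets.foldl (fun acc i => acc ++ i.toList) [])).foldl
        (fun d i => d.insert i (fA keymap i)) PySem.Dict.empty).getD i 0)
      = j.toList.map (fA keymap) := List.map_eq_map_iff.mpr hd
  rw [hmap]
  split_ifs with h
  · rfl
  · exact (zero_add _).symm
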